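-- pv_equiv track=rewrite | github.com/pypi-data/pypi-mirror-351 | packages/llumo/llumo-0.2.12.tar.gz/llumo-0.2.12/llumo/helpingFuntions.py | costColumnMapping
-- ===== SOURCE A (Python) =====
-- def costColumnMapping(costResults, allProcess):
--     # this dict will store cost column data for each row
--     cost_cols = {}
--
--     compressed_prompt = []
--     compressed_prompt_output = []
--     cost = []
--     cost_saving = []
--
--     for record in allProcess:
--         cost_cols[record] = []
--         for item in costResults:
--             if list(item.keys())[0].split("-")[0] == record.split("-")[0]:
--                 cost_cols[record].append(list(item.values())[0])
--
--     for ky, val in cost_cols.items():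
--         try:
--             compressed_prompt.append(val[0])
--         except IndexError:
--             compressed_prompt.append("error occured")
--
--         try:
--             compressed_prompt_output.append(val[1])
--         except IndexError:
--             compressed_prompt_output.append("error occured")
--
--         try:
--             cost.append(val[2])
--         except IndexError:
--             cost.append("error occured")
--
--         try:
--             cost_saving.append(val[3])
--         except IndexError:
--             cost_saving.append("error occured")
--
--     return compressed_prompt, compressed_prompt_output, cost, cost_saving
-- ===== SOURCE B (Python) =====
-- def costColumnMapping(costResults, allProcess):
--     # Index costResults by key-prefix once, then look each distinct record up:
--     # the inner scan over costResults disappears.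
--     if not allProcess:
--         return [], [], [], []
--     pairs = [(list(item.keys())[0].split("-")[0], list(item.values())[0])
--              for item in costResults]
--     index = {}
--     for pref, v in pairs:
--         index.setdefault(pref, []).append(v)
--     cp, cpo, cost, cs = [], [], [], []
--     for rec in dict.fromkeys(allProcess):
--         vals = index.get(rec.split("-")[0], [])
--         n = len(vals)
--         cp.append(vals[0] if n > 0 else "error occured")
--         cpo.append(vals[1] if n > 1 else "error occured")
--         cost.append(vals[2] if n > 2 else "error occured")
--         cs.append(vals[3] if n > 3 else "error occured")
--     return cp, cpo, cost, cs
-- ===== Notes on version B (the rewrite author's own statement) =====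
-- stated objective: faster
-- what changed: Replaces A's nested scan (for every record, rescan all costResults) by a single pass building a prefix-keyed index dict of value lists, then one indexed lookup per distinct record with positional extraction instead of per-column try/except appends.
import Mathlib
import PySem

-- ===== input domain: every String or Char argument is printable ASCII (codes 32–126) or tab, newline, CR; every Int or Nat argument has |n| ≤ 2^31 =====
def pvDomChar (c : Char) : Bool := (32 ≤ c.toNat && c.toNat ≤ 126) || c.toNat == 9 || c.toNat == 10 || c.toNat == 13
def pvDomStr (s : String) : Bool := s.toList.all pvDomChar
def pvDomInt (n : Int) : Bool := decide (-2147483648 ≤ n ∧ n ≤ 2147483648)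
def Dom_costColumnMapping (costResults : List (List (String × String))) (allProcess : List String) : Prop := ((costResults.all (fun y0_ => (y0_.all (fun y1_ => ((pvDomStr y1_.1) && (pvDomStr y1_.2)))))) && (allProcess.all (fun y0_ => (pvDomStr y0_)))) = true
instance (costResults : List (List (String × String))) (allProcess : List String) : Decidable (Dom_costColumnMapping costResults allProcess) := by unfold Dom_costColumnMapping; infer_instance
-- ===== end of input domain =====

-- B replaces A's nested scan (rescan costResults per record) by a one-pass prefix-keyed index dict
-- plus one lookup per distinct record; return value only, timing label per the check.


-- shared primitives of both sources: list(item.keys())[0] / list(item.values())[0] of the Python dict `item`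
-- (PySem.Dict.ofList reproduces dict construction from the pair list), and s.split("-")[0]
def pvFirstKey (item : List (String × String)) : String :=
  ((PySem.Dict.ofList item).keys).headD ""
def pvFirstVal (item : List (String × String)) : String :=
  ((PySem.Dict.ofList item).values).headD ""
def pvPrefix (s : String) : String :=
  ((PySem.Str.split? s "-").getD []).headD ""
-- try: val[i]  except IndexError: "error occured"  (A's extraction)
def pvCell (val : List String) (i : Int) : String :=
  match PySem.List.pyGet? val i with | some v => v | none => "error occured"

-- ===== PORT A =====
def costColumnMapping (costResults : List (List (String × String))) (allProcess : List String) : List String × List String × List String × List String :=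
  let cost_cols : PySem.Dict String (List String) :=
    allProcess.foldl (fun d record =>
      costResults.foldl (fun d item =>
        if pvPrefix (pvFirstKey item) == pvPrefix record
        then d.modify record [] (fun v => v ++ [pvFirstVal item]) else d)
        (d.insert record []))
      PySem.Dict.empty
  cost_cols.items.foldl (fun acc kv =>
      (acc.1 ++ [pvCell kv.2 0], acc.2.1 ++ [pvCell kv.2 1],
       acc.2.2.1 ++ [pvCell kv.2 2], acc.2.2.2 ++ [pvCell kv.2 3]))
    (([], [], [], []) : List String × List String × List String × List String)

-- ===== PORT B =====
-- 'vals[i] if n > i else "error occured"' of Source B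
def pvCellB (vals : List String) (i : Nat) : String :=
  if i < vals.length then vals.getD i "" else "error occured"

def costColumnMapping_alt (costResults : List (List (String × String))) (allProcess : List String) : List String × List String × List String × List String :=
  if allProcess.isEmpty then ([], [], [], [])
  else
    let pairs : List (String × String) :=
      costResults.map (fun item => (pvPrefix (pvFirstKey item), pvFirstVal item))
    -- index.setdefault(pref, []).append(v)  ==  modify pref [] (· ++ [v])
    let index : PySem.Dict String (List String) :=
      pairs.foldl (fun d p => d.modify p.1 [] (fun v => v ++ [p.2])) PySem.Dict.empty
    (PySem.List.dedup allProcess).foldl (fun acc rec =>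
        let vals := index.getD (pvPrefix rec) []
        (acc.1 ++ [pvCellB vals 0], acc.2.1 ++ [pvCellB vals 1],
         acc.2.2.1 ++ [pvCellB vals 2], acc.2.2.2 ++ [pvCellB vals 3]))
      (([], [], [], []) : List String × List String × List String × List String)

-- ===== PRECONDITION & SPEC =====
-- A raises IndexError on list(item.keys())[0] when some item is an empty dict and allProcess is nonempty; exactly those inputs are excluded.
def Pre_costColumnMapping (costResults : List (List (String × String))) (allProcess : List String) : Prop :=
  allProcess = [] ∨ ∀ item ∈ costResults, item ≠ []
instance (costResults : List (List (String × String))) (allProcess : List String) : Decidable (Pre_costColumnMapping costResults allProcess) := by unfold Pre_costColumnMapping; infer_instance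
def pvWitness_costColumnMapping : (List (List (String × String))) × List String :=
  ([[("a-1", "v1")], [("b", "w")]], ["a-x", "b"])

def Spec_costColumnMapping (costResults : List (List (String × String))) (allProcess : List String) (out : List String × List String × List String × List String) : Prop := out = costColumnMapping_alt costResults allProcess
instance (costResults : List (List (String × String))) (allProcess : List String) (out : List String × List String × List String × List String) : Decidable (Spec_costColumnMapping costResults allProcess out) := by unfold Spec_costColumnMapping; infer_instance

-- ===== CLAIM (what is proved, stated in full; the proofs are below) =====
def Claim_equal_costColumnMapping : Prop := ∀ (costResults : List (List (String × String))) (allProcess : List String), Dom_costColumnMapping costResults allProcess → Pre_costColumnMapping costResults allProcess → Spec_costColumnMapping costResults allProcess (costColumnMapping costResults allProcess)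

-- ===== LEMMAS AND PROOFS =====

-- the value-list collected for one record (shared characterisation of both ports)
def pvGroup (costResults : List (List (String × String))) (r : String) : List String :=
  (costResults.filter (fun item => pvPrefix (pvFirstKey item) == pvPrefix r)).map pvFirstVal

-- Dict.modify is insert of the modified value (holds by definition of modify)
lemma pv_modify_eq_insert (d : PySem.Dict String (List String)) (k : String)
    (f : List String → List String) : d.modify k [] f = d.insert k (f (d.getD k [])) :=
  PySem.Dict.ext_iff.mpr rfl

-- A's inner loop: repeated appends at the freshly (re)inserted key r0 amount to one insert of the collected group
lemma pv_inner_fold (cr : List (List (String × String))) (r0 : String) :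
    ∀ (d0 : PySem.Dict String (List String)) (w : List String),
      cr.foldl (fun d item =>
          if pvPrefix (pvFirstKey item) == pvPrefix r0
          then d.modify r0 [] (fun v => v ++ [pvFirstVal item]) else d) (d0.insert r0 w)
      = d0.insert r0 (w ++ (cr.filter (fun item => pvPrefix (pvFirstKey item) == pvPrefix r0)).map pvFirstVal) := by
  induction cr with
  | nil => intro d0 w; simp
  | cons item rest ih =>
    intro d0 w
    by_cases h : pvPrefix (pvFirstKey item) == pvPrefix r0
    · rw [List.foldl_cons, if_pos h,
        show (d0.insert r0 w).modify r0 [] (fun v => v ++ [pvFirstVal item])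
            = d0.insert r0 (w ++ [pvFirstVal item]) by
          rw [pv_modify_eq_insert]
          simp [PySem.Dict.getD_insert_self, PySem.Dict.insert_insert_self],
        ih d0 (w ++ [pvFirstVal item])]
      simp [h]
    · rw [List.foldl_cons, if_neg (by simp [h]), ih d0 w]
      simp [h]

-- value stored by a pure re-insertion loop
lemma pv_getD_foldl_insert (g : String → List String) :
    ∀ (ps : List String) (d : PySem.Dict String (List String)) (k : String),
      (ps.foldl (fun d r => d.insert r (g r)) d).getD k []
      = if k ∈ ps then g k else d.getD k [] := by
  intro ps
  induction ps with
  | nil => intro d k; simp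
  | cons r rest ih =>
    intro d k
    rw [List.foldl_cons, ih]
    by_cases hk : k ∈ rest
    · simp [hk]
    · by_cases hkr : k = r
      · subst hkr; simp [hk]
      · simp [hk, hkr, PySem.Dict.getD_insert]

-- items of phase 1: one entry per distinct record, first-occurrence order, carrying its group
lemma pv_phase1_items (g : String → List String) (ps : List String) :
    (ps.foldl (fun d r => d.insert r (g r)) PySem.Dict.empty).items
      = (PySem.List.dedup ps).map (fun r => (r, g r)) := by
  have hnd : (ps.foldl (fun d r => d.insert r (g r)) PySem.Dict.empty).keys.Nodup := by
    exact PySem.Dict.nodup_keys_foldl_insert ps (fun _ r => g r) _ PySem.Dict.nodup_keys_empty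
  have hkeys : (ps.foldl (fun d r => d.insert r (g r)) PySem.Dict.empty).keys
      = PySem.List.dedup ps := by
    rw [PySem.Dict.keys_foldl_insert ps (fun _ r => g r)]
    simp [PySem.Dict.keys_empty, PySem.List.dedup_eq_ofList, PySem.Set.update, PySem.Set.ofList]
  rw [PySem.Dict.items_eq_map_keys _ hnd [], hkeys]
  refine List.map_congr_left ?_
  intro k hk
  have hkps : k ∈ ps := (PySem.List.mem_dedup _ _).mp hk
  rw [pv_getD_foldl_insert g ps PySem.Dict.empty k, if_pos hkps]

-- a four-accumulator append fold is four maps (used for both ports' output loops)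
lemma pv_fold4 {α : Type} (f0 f1 f2 f3 : α → String) :
    ∀ (l : List α) (a b c d : List String),
      l.foldl (fun acc x =>
          (acc.1 ++ [f0 x], acc.2.1 ++ [f1 x], acc.2.2.1 ++ [f2 x], acc.2.2.2 ++ [f3 x])) (a, b, c, d)
      = (a ++ l.map f0, b ++ l.map f1, c ++ l.map f2, d ++ l.map f3) := by
  intro l
  induction l with
  | nil => intro a b c d; simp
  | cons x rest ih =>
    intro a b c d
    rw [List.foldl_cons, ih]
    simp

-- B's index lookup yields exactly the group A collects
lemma pv_index_getD (cr : List (List (String × String))) (r : String) :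
    ((cr.map (fun item => (pvPrefix (pvFirstKey item), pvFirstVal item))).foldl
        (fun d p => d.modify p.1 [] (fun v => v ++ [p.2])) PySem.Dict.empty).getD (pvPrefix r) []
      = pvGroup cr r := by
  rw [PySem.Dict.getD_foldl_modify_append]
  simp [pvGroup, List.filter_map, Function.comp_def]

-- B's guarded cell equals A's try/except cell
lemma pv_cell_eq (g : List String) (k : Nat) :
    pvCellB g k = PySem.List.pyGetD g (k : Int) "error occured" := by
  rw [PySem.List.pyGetD_natCast]
  unfold pvCellB
  by_cases h : k < g.length
  · rw [if_pos h, List.getD_eq_getElem?_getD, List.getD_eq_getElem?_getD,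
      List.getElem?_eq_getElem h]
    rfl
  · rw [if_neg h, List.getD_eq_getElem?_getD, List.getElem?_eq_none (by omega)]
    rfl

lemma pv_cell_as_getD (g : List String) (i : Int) :
    pvCell g i = PySem.List.pyGetD g i "error occured" := by
  unfold pvCell PySem.List.pyGetD
  cases PySem.List.pyGet? g i <;> rfl

-- ===== VERDICT (by name: the statement is the Claim_ definition above) =====
theorem costColumnMapping_spec : Claim_equal_costColumnMapping := by
  intro cr ps _ _
  unfold Spec_costColumnMapping costColumnMapping costColumnMapping_alt
  simp only []
  have houter : ps.foldl (fun d record =>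
      cr.foldl (fun d item =>
        if pvPrefix (pvFirstKey item) == pvPrefix record
        then d.modify record [] (fun v => v ++ [pvFirstVal item]) else d)
        (d.insert record [])) PySem.Dict.empty
      = ps.foldl (fun d r => d.insert r (pvGroup cr r)) PySem.Dict.empty := by
    refine PySem.List.foldl_congr_mem _ _ _ _ ?_
    intro d r _
    rw [pv_inner_fold cr r d []]
    simp [pvGroup]
  rw [houter, pv_phase1_items (pvGroup cr) ps,
    pv_fold4 (fun kv : String × List String => pvCell kv.2 0)
      (fun kv : String × List String => pvCell kv.2 1)
      (fun kv : String × List String => pvCell kv.2 2)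
      (fun kv : String × List String => pvCell kv.2 3)]
  by_cases hps : ps = []
  · simp [hps, PySem.List.dedup]
  · rw [if_neg (by simp [List.isEmpty_iff, hps])]
    rw [pv_fold4 (fun rec : String => pvCellB (((cr.map (fun item => (pvPrefix (pvFirstKey item), pvFirstVal item))).foldl (fun d p => d.modify p.1 [] (fun v => v ++ [p.2])) PySem.Dict.empty).getD (pvPrefix rec) []) 0)
      (fun rec : String => pvCellB (((cr.map (fun item => (pvPrefix (pvFirstKey item), pvFirstVal item))).foldl (fun d p => d.modify p.1 [] (fun v => v ++ [p.2])) PySem.Dict.empty).getD (pvPrefix rec) []) 1)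
      (fun rec : String => pvCellB (((cr.map (fun item => (pvPrefix (pvFirstKey item), pvFirstVal item))).foldl (fun d p => d.modify p.1 [] (fun v => v ++ [p.2])) PySem.Dict.empty).getD (pvPrefix rec) []) 2)
      (fun rec : String => pvCellB (((cr.map (fun item => (pvPrefix (pvFirstKey item), pvFirstVal item))).foldl (fun d p => d.modify p.1 [] (fun v => v ++ [p.2])) PySem.Dict.empty).getD (pvPrefix rec) []) 3)]
    simp only [List.nil_append, List.map_map, Prod.mk.injEq]
    refine ⟨?_, ?_, ?_, ?_⟩ <;>
    · refine List.map_congr_left ?_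
      intro r _
      simp only [Function.comp_apply]
      rw [pv_index_getD, pv_cell_eq, pv_cell_as_getD]
      norm_num
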